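-- pv_equiv track=rewrite | github.com/MoniRior/Proyecto-Final-Algoritmos-Bioinspirados | OpNonogramas.py | getColorSequence
-- ===== SOURCE A (Python) =====
-- def getColorSequence(filaCol):
--     sequence = []
--     count = 0
--     current_color = None
--
--     for celda in filaCol:
--         if celda != 0:  # Si la celda está pintada
--             if celda == current_color:  # Si el color es el mismo, incrementa el contador
--                 count += 1
--             else:  # Si cambia el color, guarda la secuencia anterior (si existe) y empieza una nueva
--                 if count > 0:
--                     sequence.append((count, current_color))
--                 current_color = celda
--                 count = 1
--         else:  # Si la celda está vacía
--             if count > 0: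
--                 sequence.append((count, current_color))
--                 count = 0
--                 current_color = None
--
--     # Si queda una secuencia al final
--     if count > 0:
--         sequence.append((count, current_color))
--
--     # Rellena con (0, 0) hasta alcanzar el tamano de la pista
--     while len(sequence) < len(filaCol):
--         sequence.insert(0, (0, 0))
--
--     return sequence[-(len(filaCol)):]
-- ===== SOURCE B (Python) =====
-- def getColorSequence(filaCol):
--     n = len(filaCol)
--     bounds = [i for i in range(n) if i == 0 or filaCol[i] != filaCol[i - 1]] + [n]
--     seq = [(bounds[j + 1] - bounds[j], filaCol[bounds[j]])
--            for j in range(len(bounds) - 1) if filaCol[bounds[j]] != 0]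
--     return [(0, 0)] * (n - len(seq)) + seq
-- ===== Notes on version B (the rewrite author's own statement) =====
-- stated objective: alternative
-- what changed: B computes the list of run-boundary indices (positions where the value changes) in one comprehension and derives each run's length by differencing consecutive boundaries, plus one prepend of the padding, instead of A's per-element count/current_color state machine with its insert(0) padding loop.
import Mathlib
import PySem

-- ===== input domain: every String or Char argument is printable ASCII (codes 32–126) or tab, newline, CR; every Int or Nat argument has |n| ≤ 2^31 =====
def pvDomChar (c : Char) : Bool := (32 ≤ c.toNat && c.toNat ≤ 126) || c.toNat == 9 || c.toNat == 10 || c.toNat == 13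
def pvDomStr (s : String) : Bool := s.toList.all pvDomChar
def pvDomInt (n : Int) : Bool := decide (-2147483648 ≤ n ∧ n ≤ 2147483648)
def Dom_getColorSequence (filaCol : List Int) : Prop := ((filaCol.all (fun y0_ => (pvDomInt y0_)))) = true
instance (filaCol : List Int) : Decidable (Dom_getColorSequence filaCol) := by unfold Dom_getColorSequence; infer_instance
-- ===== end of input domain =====

-- B computes the run-boundary index list and derives each run length by differencing consecutive
-- boundaries (two staged comprehensions over indices), instead of A's per-element count/current_color
-- state machine with its insert(0) padding loop (objective: alternative).

-- ===== PORT A =====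
-- loop body of A: state = (sequence, count, current_color); current_color None ↦ Option.none
def pvStepA (st : List (Int × Int) × Int × Option Int) (celda : Int) :
    List (Int × Int) × Int × Option Int :=
  match st with
  | (seq, count, cc) =>
    if celda ≠ 0 then
      if some celda = cc then (seq, count + 1, cc)
      else ((if count > 0 then seq ++ [(count, cc.getD 0)] else seq), 1, some celda)
    else
      if count > 0 then (seq ++ [(count, cc.getD 0)], 0, none)
      else (seq, count, cc)

-- A's 'while len(sequence) < len(filaCol): sequence.insert(0, (0, 0))'
-- (structural recursion on the fuel n - s.length, the exact number of iterations; totality device only)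
def pvPadAFuel : Nat → Nat → List (Int × Int) → List (Int × Int)
  | 0, _, s => s
  | fuel + 1, n, s => if s.length < n then pvPadAFuel fuel n ((0, 0) :: s) else s

def pvPadA (n : Nat) (s : List (Int × Int)) : List (Int × Int) :=
  pvPadAFuel (n - s.length) n s

def getColorSequence (filaCol : List Int) : List (Int × Int) :=
  let st := filaCol.foldl pvStepA ([], 0, none)
  let seq := if st.2.1 > 0 then st.1 ++ [(st.2.1, st.2.2.getD 0)] else st.1
  let padded := pvPadA filaCol.length seq
  PySem.List.slice padded (some (-(filaCol.length : Int))) none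

-- ===== PORT B =====
-- 'bounds = [i for i in range(n) if i == 0 or filaCol[i] != filaCol[i - 1]] + [n]'
-- (all list indexing in B is with in-range non-negative indices, so List.getD is exact)
def pvChange (xs : List Int) : List Nat :=
  (List.range xs.length).filter
    (fun i => decide (i = 0 ∨ xs.getD i 0 ≠ xs.getD (i - 1) 0))

def pvBounds (xs : List Int) : List Nat := pvChange xs ++ [xs.length]

-- 'seq = [(bounds[j+1]-bounds[j], filaCol[bounds[j]]) for j in range(len(bounds)-1) if filaCol[bounds[j]] != 0]'
def pvSeqOf (xs : List Int) (bs : List Nat) : List (Int × Int) :=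
  (List.range (bs.length - 1)).filterMap (fun j =>
    if xs.getD (bs.getD j 0) 0 ≠ 0 then
      some (((bs.getD (j + 1) 0 : Int) - (bs.getD j 0 : Int)), xs.getD (bs.getD j 0) 0)
    else none)

def getColorSequence_alt (filaCol : List Int) : List (Int × Int) :=
  let seq := pvSeqOf filaCol (pvBounds filaCol)
  List.replicate (filaCol.length - seq.length) (0, 0) ++ seq

-- ===== PRECONDITION & SPEC =====
def Spec_getColorSequence (filaCol : List Int) (out : List (Int × Int)) : Prop := out = getColorSequence_alt filaCol
instance (filaCol : List Int) (out : List (Int × Int)) : Decidable (Spec_getColorSequence filaCol out) := by unfold Spec_getColorSequence; infer_instance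

-- ===== CLAIM (what is proved, stated in full; the proofs are below) =====
def Claim_equal_getColorSequence : Prop := ∀ (filaCol : List Int), Dom_getColorSequence filaCol → Spec_getColorSequence filaCol (getColorSequence filaCol)

-- ===== LEMMAS AND PROOFS =====
-- the filtered run-length encoding both programs compute, as a recursive reference function
def pvR : List Int → List (Int × Int)
  | [] => []
  | x :: xs =>
      (if x ≠ 0 then [((1 + ((xs.takeWhile (· == x)).length : Int), x))] else [])
        ++ pvR (xs.dropWhile (· == x))
termination_by l => l.length
decreasing_by have := List.length_dropWhile_le (· == x) xs; simp; omega

def pvFlush (st : List (Int × Int) × Int × Option Int) : List (Int × Int) :=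
  if st.2.1 > 0 then st.1 ++ [(st.2.1, st.2.2.getD 0)] else st.1

theorem pvR_dropZeros : ∀ ys : List Int, pvR (ys.dropWhile (· == (0:Int))) = pvR ys := by
  intro ys
  induction ys with
  | nil => rfl
  | cons z zs ih =>
    by_cases hz : z = 0
    · subst hz
      rw [show (((0:Int) :: zs).dropWhile (· == (0:Int))) = zs.dropWhile (· == (0:Int)) by
            simp [List.dropWhile]]
      rw [ih]
      show pvR zs = pvR ((0:Int) :: zs)
      rw [show pvR ((0:Int) :: zs) = pvR (zs.dropWhile (· == (0:Int))) by
            rw [pvR]; simp]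
      rw [ih]
    · have h0 : (z == (0:Int)) = false := by simp [hz]
      simp [List.dropWhile, h0]

theorem pvR_zero_cons (ys : List Int) : pvR ((0:Int) :: ys) = pvR ys := by
  have h : pvR ((0:Int) :: ys) = pvR (ys.dropWhile (· == (0:Int))) := by
    rw [pvR]; simp
  rw [h, pvR_dropZeros]

theorem pvR_cons_ne (x : Int) (xs : List Int) (hx : x ≠ 0) :
    pvR (x :: xs) = (1 + ((xs.takeWhile (· == x)).length : Int), x)
      :: pvR (xs.dropWhile (· == x)) := by
  rw [pvR]; simp [hx]

theorem pvMain : ∀ (n : Nat) (xs : List Int), xs.length ≤ n →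
    (∀ seq, pvFlush (xs.foldl pvStepA (seq, 0, none)) = seq ++ pvR xs) ∧
    (∀ seq (cnt c : Int), c ≠ 0 → 0 < cnt →
      pvFlush (xs.foldl pvStepA (seq, cnt, some c)) =
        seq ++ (cnt + ((xs.takeWhile (· == c)).length : Int), c)
          :: pvR (xs.dropWhile (· == c))) := by
  intro n
  induction n with
  | zero =>
    intro xs hlen
    have : xs = [] := List.length_eq_zero_iff.mp (Nat.le_zero.mp hlen)
    subst this
    constructor
    · intro seq; simp [pvFlush, pvR]
    · intro seq cnt c hc hcnt
      simp [pvFlush, pvR, hcnt]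
  | succ n ih =>
    intro xs hlen
    cases xs with
    | nil =>
      constructor
      · intro seq; simp [pvFlush, pvR]
      · intro seq cnt c hc hcnt
        simp [pvFlush, pvR, hcnt]
    | cons x xs' =>
      have hlen' : xs'.length ≤ n := by simp at hlen; omega
      constructor
      · intro seq
        by_cases hx : x = 0
        · subst hx
          rw [show List.foldl pvStepA (seq, 0, none) ((0:Int) :: xs')
                = List.foldl pvStepA (seq, 0, none) xs' by simp [pvStepA]]
          rw [(ih xs' hlen').1 seq, pvR_zero_cons]
        · rw [show List.foldl pvStepA (seq, 0, none) (x :: xs')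
                = List.foldl pvStepA (seq, 1, some x) xs' by simp [pvStepA, hx]]
          rw [(ih xs' hlen').2 seq 1 x hx (by norm_num), pvR_cons_ne x xs' hx]
      · intro seq cnt c hc hcnt
        by_cases hx : x = 0
        · subst hx
          rw [show List.foldl pvStepA (seq, cnt, some c) ((0:Int) :: xs')
                = List.foldl pvStepA (seq ++ [(cnt, c)], 0, none) xs' by
                simp [pvStepA, hcnt]]
          rw [(ih xs' hlen').1 (seq ++ [(cnt, c)])]
          have h0 : ((0:Int) == c) = false := by simp [Ne.symm hc]
          have ht : (((0:Int) :: xs').takeWhile (· == c)) = [] := by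
            simp [List.takeWhile, h0]
          have hd : (((0:Int) :: xs').dropWhile (· == c)) = (0:Int) :: xs' := by
            simp [List.dropWhile, h0]
          rw [ht, hd, pvR_zero_cons]
          simp
        · by_cases hxc : x = c
          · subst hxc
            rw [show List.foldl pvStepA (seq, cnt, some x) (x :: xs')
                  = List.foldl pvStepA (seq, cnt + 1, some x) xs' by
                  simp [pvStepA, hx]]
            rw [(ih xs' hlen').2 seq (cnt + 1) x hx (by omega)]
            have ht : ((x :: xs').takeWhile (· == x)) = x :: xs'.takeWhile (· == x) := by
              simp [List.takeWhile]
            have hd : ((x :: xs').dropWhile (· == x)) = xs'.dropWhile (· == x) := by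
              simp [List.dropWhile]
            rw [ht, hd]
            have : cnt + 1 + ((xs'.takeWhile (· == x)).length : Int)
                = cnt + ((x :: xs'.takeWhile (· == x)).length : Int) := by
              simp; ring
            rw [this]
          · rw [show List.foldl pvStepA (seq, cnt, some c) (x :: xs')
                  = List.foldl pvStepA (seq ++ [(cnt, c)], 1, some x) xs' by
                  simp [pvStepA, hx, hxc, hcnt]]
            rw [(ih xs' hlen').2 (seq ++ [(cnt, c)]) 1 x hx (by norm_num)]
            have hxcb : (x == c) = false := by simp [hxc]
            have ht : ((x :: xs').takeWhile (· == c)) = [] := by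
              simp [List.takeWhile, hxcb]
            have hd : ((x :: xs').dropWhile (· == c)) = x :: xs' := by
              simp [List.dropWhile, hxcb]
            rw [ht, hd, pvR_cons_ne x xs' hx]
            simp

theorem pvPadAFuel_eq : ∀ (k n : Nat) (s : List (Int × Int)), n - s.length = k →
    pvPadAFuel k n s = List.replicate (n - s.length) (0, 0) ++ s := by
  intro k
  induction k with
  | zero =>
    intro n s h
    rw [pvPadAFuel, h]
    simp
  | succ k ih =>
    intro n s h
    rw [pvPadAFuel, if_pos (by omega)]
    rw [ih n ((0,0) :: s) (by simp; omega)]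
    have : n - s.length = (n - ((0,0) :: s).length) + 1 := by simp; omega
    rw [this, List.replicate_succ']
    simp

theorem pvPadA_eq (n : Nat) (s : List (Int × Int)) :
    pvPadA n s = List.replicate (n - s.length) (0, 0) ++ s :=
  pvPadAFuel_eq (n - s.length) n s rfl

theorem pvR_length_le : ∀ (n : Nat) (xs : List Int), xs.length ≤ n →
    (pvR xs).length ≤ xs.length := by
  intro n
  induction n with
  | zero =>
    intro xs h
    have : xs = [] := List.length_eq_zero_iff.mp (Nat.le_zero.mp h)
    subst this; simp [pvR]
  | succ n ih =>
    intro xs h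
    cases xs with
    | nil => simp [pvR]
    | cons x xs' =>
      rw [pvR]
      have h1 := List.length_dropWhile_le (· == x) xs'
      have h2 := ih (xs'.dropWhile (· == x)) (by simp at h; omega)
      by_cases hx : x = 0
      · subst hx; simp; omega
      · simp [hx]; omega

-- ---- B-side lemmas ----
theorem pvGetD_map (f : Nat → Nat) (l : List Nat) (j : Nat) (h : j < l.length) :
    (l.map f).getD j 0 = f (l.getD j 0) := by
  simp [List.getD_eq_getElem?_getD, h]

theorem pvGetD_run (x : Int) : ∀ (r : List Int), (∀ e ∈ r, e = x) →
    ∀ i, i < r.length → r.getD i 0 = x := by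
  intro r
  induction r with
  | nil => intro _ i hi; simp at hi
  | cons a r' ih =>
    intro h i hi
    cases i with
    | zero => simpa using h a (by simp)
    | succ i =>
      simp only [List.getD_cons_succ]
      exact ih (fun e he => h e (by simp [he])) i (by simp at hi; omega)

theorem pvDropWhile_head (x : Int) : ∀ (l : List Int) (y : Int) (t' : List Int),
    l.dropWhile (· == x) = y :: t' → y ≠ x := by
  intro l
  induction l with
  | nil => intro y t' h; simp [List.dropWhile] at h
  | cons a l' ih =>
    intro y t' h
    by_cases ha : a = x
    · rw [List.dropWhile_cons_of_pos (by simp [ha])] at h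
      exact ih y t' h
    · rw [List.dropWhile_cons_of_neg (by simp [ha])] at h
      cases h; exact ha

theorem pvFilterMap_congr {α β : Type} (f g : α → Option β) :
    ∀ l : List α, (∀ a ∈ l, f a = g a) → l.filterMap f = l.filterMap g := by
  intro l
  induction l with
  | nil => intro _; rfl
  | cons a l' ih =>
    intro h
    simp only [List.filterMap_cons, h a (by simp), ih (fun b hb => h b (by simp [hb]))]

theorem pvChange_cons (x : Int) (xs' : List Int) :
    pvChange (x :: xs') =
      0 :: (pvChange (xs'.dropWhile (· == x))).map
        (fun b => ((xs'.takeWhile (· == x)).length + 1) + b) := by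
  classical
  set tw := xs'.takeWhile (· == x) with htw
  set t := xs'.dropWhile (· == x) with ht
  have hrt : (x :: tw) ++ t = x :: xs' := by
    simp [htw, ht, List.takeWhile_append_dropWhile]
  set k := tw.length + 1 with hk
  have hrun : ∀ e ∈ x :: tw, e = x := by
    intro e he
    rcases List.mem_cons.mp he with h | h
    · exact h
    · have := List.mem_takeWhile_imp h
      simpa using this
  have hrlen : (x :: tw).length = k := by simp [hk]
  have hlen : (x :: xs').length = k + t.length := by
    rw [← hrt]; simp [hk]; omega
  unfold pvChange
  rw [hlen, List.range_add, List.filter_append]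
  -- the first k indices: only 0 passes
  have hfirst : (List.range k).filter
      (fun i => decide (i = 0 ∨ (x :: xs').getD i 0 ≠ (x :: xs').getD (i - 1) 0)) = [0] := by
    rw [hk, List.range_succ_eq_map, List.filter_cons_of_pos (by simp)]
    rw [List.filter_map]
    have : (List.range tw.length).filter
        ((fun i => decide (i = 0 ∨ (x :: xs').getD i 0 ≠ (x :: xs').getD (i - 1) 0)) ∘ Nat.succ)
        = [] := by
      rw [List.filter_eq_nil_iff]
      intro i hi
      have hi' : i < tw.length := List.mem_range.mp hi
      have h1 : (x :: xs').getD (i + 1) 0 = x := by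
        rw [← hrt, List.getD_append _ _ _ _ (by simp [hrlen, hk]; omega)]
        exact pvGetD_run x (x :: tw) hrun (i + 1) (by simp [hrlen, hk]; omega)
      have h2 : (x :: xs').getD i 0 = x := by
        rw [← hrt, List.getD_append _ _ _ _ (by simp [hrlen, hk]; omega)]
        exact pvGetD_run x (x :: tw) hrun i (by simp [hrlen, hk]; omega)
      simp only [Function.comp_apply]
      rw [show i + 1 - 1 = i from rfl, h1, h2]
      simp
    rw [this]
    simp
  rw [hfirst]
  -- the remaining indices shift to t's change indices
  have hsecond : ((List.range t.length).map (fun i => k + i)).filter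
      (fun i => decide (i = 0 ∨ (x :: xs').getD i 0 ≠ (x :: xs').getD (i - 1) 0))
      = (pvChange t).map (fun b => k + b) := by
    rw [List.filter_map]
    unfold pvChange
    congr 1
    apply List.filter_congr
    intro j hj
    have hj' : j < t.length := List.mem_range.mp hj
    have hget : ∀ b : Nat, (x :: xs').getD (k + b) 0 = t.getD b 0 := by
      intro b
      rw [← hrt, List.getD_append_right _ _ _ _ (by rw [hrlen]; omega)]
      congr 1
      rw [hrlen]; omega
    cases j with
    | zero =>
      have hne : t ≠ [] := by intro h0; rw [h0] at hj'; simp at hj'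
      obtain ⟨y, t'', hy⟩ := List.exists_cons_of_ne_nil hne
      have hyx : y ≠ x := pvDropWhile_head x xs' y t'' (by rw [← ht, hy])
      have h1 : (x :: xs').getD (k + 0) 0 = y := by rw [hget 0, hy]; rfl
      have h2 : (x :: xs').getD (k + 0 - 1) 0 = x := by
        rw [← hrt, List.getD_append _ _ _ _ (by rw [hrlen]; omega)]
        exact pvGetD_run x (x :: tw) hrun (k + 0 - 1) (by rw [hrlen]; omega)
      simp only [Function.comp_apply]
      rw [h1, h2]
      simp [hk, hyx]
    | succ j' =>
      have h1 : (x :: xs').getD (k + (j' + 1)) 0 = t.getD (j' + 1) 0 := hget (j' + 1)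
      have h2 : (x :: xs').getD (k + (j' + 1) - 1) 0 = t.getD j' 0 := by
        rw [show k + (j' + 1) - 1 = k + j' by omega, hget j']
      simp only [Function.comp_apply]
      rw [h1, h2, show j' + 1 - 1 = j' from rfl]
      simp [hk]
  rw [hsecond]
  simp [pvChange]

theorem pvBounds_cons (x : Int) (xs' : List Int) :
    pvBounds (x :: xs') =
      0 :: (pvBounds (xs'.dropWhile (· == x))).map
        (fun b => ((xs'.takeWhile (· == x)).length + 1) + b) := by
  have hlen : (x :: xs').length
      = ((xs'.takeWhile (· == x)).length + 1) + (xs'.dropWhile (· == x)).length := by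
    have := congrArg List.length (List.takeWhile_append_dropWhile (p := (· == x)) (l := xs'))
    simp only [List.length_append] at this
    simp only [List.length_cons]
    omega
  unfold pvBounds
  rw [pvChange_cons, hlen]
  simp

theorem pvBounds_ne_nil (t : List Int) : pvBounds t ≠ [] := by
  simp [pvBounds]

theorem pvBounds_head (t : List Int) : (pvBounds t).getD 0 0 = 0 := by
  cases t with
  | nil => simp [pvBounds, pvChange]
  | cons y t'' =>
    unfold pvBounds pvChange
    simp only [List.length_cons, List.range_succ_eq_map]
    rw [List.filter_cons_of_pos (by simp)]
    simp

theorem pvSeqOf_cons (xs : List Int) (b0 : Nat) (bs : List Nat) (h : bs ≠ []) :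
    pvSeqOf xs (b0 :: bs) =
      (if xs.getD b0 0 ≠ 0 then [(((bs.getD 0 0 : Nat) : Int) - (b0 : Int), xs.getD b0 0)] else [])
        ++ pvSeqOf xs bs := by
  cases bs with
  | nil => exact absurd rfl h
  | cons b1 bs' =>
    unfold pvSeqOf
    simp only [List.length_cons]
    rw [show bs'.length + 1 + 1 - 1 = bs'.length + 1 from rfl,
        show bs'.length + 1 - 1 = bs'.length from rfl]
    rw [List.range_succ_eq_map, List.filterMap_cons, List.filterMap_map]
    have htail : ((fun j =>
        if xs.getD ((b0 :: b1 :: bs').getD j 0) 0 ≠ 0 then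
          some ((((b0 :: b1 :: bs').getD (j + 1) 0 : Nat) : Int)
                - (((b0 :: b1 :: bs').getD j 0 : Nat) : Int),
                xs.getD ((b0 :: b1 :: bs').getD j 0) 0)
        else none) ∘ Nat.succ)
        = (fun j =>
        if xs.getD ((b1 :: bs').getD j 0) 0 ≠ 0 then
          some ((((b1 :: bs').getD (j + 1) 0 : Nat) : Int)
                - (((b1 :: bs').getD j 0 : Nat) : Int),
                xs.getD ((b1 :: bs').getD j 0) 0)
        else none) := by
      funext j
      simp [Function.comp]
    rw [htail]
    simp only [List.getD_cons_zero, List.getD_cons_succ]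
    split_ifs <;> simp

theorem pvSeqOf_shift (r t : List Int) (bs : List Nat) :
    pvSeqOf (r ++ t) (bs.map (fun b => r.length + b)) = pvSeqOf t bs := by
  unfold pvSeqOf
  rw [List.length_map]
  apply pvFilterMap_congr
  intro j hj
  have hj0 : j < bs.length := by
    have := List.mem_range.mp hj; omega
  have hj1' : j + 1 < bs.length := by
    have := List.mem_range.mp hj; omega
  rw [pvGetD_map _ _ _ hj0, pvGetD_map _ _ _ hj1']
  have hget : ∀ b : Nat, (r ++ t).getD (r.length + b) 0 = t.getD b 0 := by
    intro b
    rw [List.getD_append_right _ _ _ _ (by omega)]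
    congr 1; omega
  rw [hget]
  have : ((r.length + bs.getD (j + 1) 0 : Nat) : Int) - ((r.length + bs.getD j 0 : Nat) : Int)
      = ((bs.getD (j + 1) 0 : Nat) : Int) - ((bs.getD j 0 : Nat) : Int) := by
    push_cast; ring
  rw [this]

theorem pvBmain : ∀ (n : Nat) (xs : List Int), xs.length ≤ n →
    pvSeqOf xs (pvBounds xs) = pvR xs := by
  intro n
  induction n with
  | zero =>
    intro xs h
    have : xs = [] := List.length_eq_zero_iff.mp (Nat.le_zero.mp h)
    subst this
    simp [pvSeqOf, pvBounds, pvChange, pvR]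
  | succ n ih =>
    intro xs h
    cases xs with
    | nil => simp [pvSeqOf, pvBounds, pvChange, pvR]
    | cons x xs' =>
      set tw := xs'.takeWhile (· == x) with htw
      set t := xs'.dropWhile (· == x) with ht
      set k := tw.length + 1 with hk
      rw [pvBounds_cons]
      rw [pvSeqOf_cons _ _ _ (by simp [pvBounds])]
      have hhead : ((pvBounds t).map (fun b => k + b)).getD 0 0 = k := by
        rw [pvGetD_map _ _ _ (by
          cases hb : pvBounds t with
          | nil => exact absurd hb (pvBounds_ne_nil t)
          | cons a l => simp)]
        rw [pvBounds_head]
      have htail : pvSeqOf (x :: xs') ((pvBounds t).map (fun b => k + b))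
          = pvSeqOf t (pvBounds t) := by
        have hs := pvSeqOf_shift (x :: tw) t (pvBounds t)
        have hrt : (x :: tw) ++ t = x :: xs' := by
          simp [htw, ht, List.takeWhile_append_dropWhile]
        rw [hrt] at hs
        simpa [hk] using hs
      rw [hhead, htail]
      have hlt : t.length ≤ n := by
        have h1 : t.length ≤ xs'.length := by
          rw [ht]; exact List.length_dropWhile_le _ _
        simp at h
        omega
      rw [ih t hlt]
      rw [pvR]
      have hget0 : (x :: xs').getD 0 0 = x := rfl
      rw [hget0]
      by_cases hx : x = 0
      · simp [hx, ht]
      · simp only [hx, if_pos, ne_eq, not_false_iff]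
        simp [htw, ht, hk]
        ring

-- ===== VERDICT (by name: the statement is the Claim_ definition above) =====
theorem getColorSequence_spec : Claim_equal_getColorSequence := by
  intro filaCol _
  unfold Spec_getColorSequence getColorSequence getColorSequence_alt
  have hfold : (if (filaCol.foldl pvStepA ([], 0, none)).2.1 > 0 then
        (filaCol.foldl pvStepA ([], 0, none)).1
          ++ [((filaCol.foldl pvStepA ([], 0, none)).2.1,
               (filaCol.foldl pvStepA ([], 0, none)).2.2.getD 0)]
      else (filaCol.foldl pvStepA ([], 0, none)).1) = pvR filaCol := by
    have := (pvMain filaCol.length filaCol (le_refl _)).1 []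
    simpa [pvFlush] using this
  simp only []
  rw [hfold]
  rw [pvBmain filaCol.length filaCol (le_refl _)]
  have hle : (pvR filaCol).length ≤ filaCol.length := pvR_length_le filaCol.length filaCol (le_refl _)
  rw [pvPadA_eq filaCol.length (pvR filaCol)]
  cases hn : filaCol.length with
  | zero =>
    have : filaCol = [] := List.length_eq_zero_iff.mp hn
    subst this
    simp [pvR, PySem.List.slice]
  | succ m =>
    rw [PySem.List.slice_from_neg_natCast _ _ (by omega : 0 < m + 1)]
    have hl2 : (List.replicate (m + 1 - (pvR filaCol).length) ((0:Int),(0:Int))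
        ++ pvR filaCol).length = m + 1 := by
      simp; omega
    rw [hl2]
    simp
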